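-- pv_equiv track=rewrite | github.com/A-F-V/Bioinformatics | bioinformatics/algorithms/burrows_wheeler.py | number_letters
-- ===== SOURCE A (Python) =====
-- def number_letters(text):
--     numberings = {}
--     output = []
--     for i in text:
--         if i not in numberings:
--             numberings[i] = 1
--         output.append(f'{i}_{numberings[i]}')
--         numberings[i] += 1
--     return output
-- ===== SOURCE B (Python) =====
-- def number_letters(text):
--     totals = {}
--     for c in text:
--         totals[c] = totals.get(c, 0) + 1
--     output = []
--     for c in reversed(text):
--         output.append(f'{c}_{totals[c]}')
--         totals[c] -= 1
--     output.reverse()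
--     return output
-- ===== Notes on version B (the rewrite author's own statement) =====
-- stated objective: alternative
-- what changed: B replaces A's single forward pass with incrementing running counters by two passes: it first tallies total occurrences per character, then walks the text backwards emitting the current total as the rank and decrementing it, finally reversing the output.
import Mathlib
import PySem

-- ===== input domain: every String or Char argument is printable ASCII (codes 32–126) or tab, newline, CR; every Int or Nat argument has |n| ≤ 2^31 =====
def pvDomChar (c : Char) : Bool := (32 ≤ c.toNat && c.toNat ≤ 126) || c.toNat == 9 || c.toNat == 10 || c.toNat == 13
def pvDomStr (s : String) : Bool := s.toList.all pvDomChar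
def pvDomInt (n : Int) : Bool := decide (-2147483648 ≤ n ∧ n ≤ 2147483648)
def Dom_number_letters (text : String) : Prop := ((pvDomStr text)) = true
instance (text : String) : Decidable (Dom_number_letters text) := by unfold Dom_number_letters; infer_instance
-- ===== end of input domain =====

-- B replaces A's single forward pass with incrementing running counters by two passes:
-- tally total occurrences per character, then walk the text backwards emitting the
-- current total as the rank while decrementing it, reversing the output at the end
-- (alternative algorithm; not claimed faster).

-- ===== PORT A =====
-- the for-loop of A: state = (numberings dict, output list)
def numberLettersLoop : List Char → PySem.Dict Char Int → List String → List String
  | [], _, out => out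
  | c :: rest, numberings, out =>
    let numberings := if numberings.contains c then numberings else numberings.insert c 1
    let out := out ++ [c.toString ++ "_" ++ PySem.Int.toStr (numberings.getD c 0)]
    let numberings := numberings.insert c (numberings.getD c 0 + 1)
    numberLettersLoop rest numberings out

def number_letters (text : String) : List String :=
  numberLettersLoop text.toList PySem.Dict.empty []

-- ===== PORT B =====
-- first loop of B: totals[c] = totals.get(c, 0) + 1
def numberLettersTotals (l : List Char) : PySem.Dict Char Int :=
  l.foldl (fun d c => d.insert c (d.getD c 0 + 1)) PySem.Dict.empty

-- second loop of B: append f'{c}_{totals[c]}', then totals[c] -= 1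
def numberLettersBack : List Char → PySem.Dict Char Int → List String → List String
  | [], _, out => out
  | c :: rest, totals, out =>
    numberLettersBack rest (totals.insert c (totals.getD c 0 - 1))
      (out ++ [c.toString ++ "_" ++ PySem.Int.toStr (totals.getD c 0)])

def number_letters_alt (text : String) : List String :=
  (numberLettersBack text.toList.reverse (numberLettersTotals text.toList) []).reverse

-- ===== PRECONDITION & SPEC =====
def Spec_number_letters (text : String) (out : List String) : Prop := out = number_letters_alt text
instance (text : String) (out : List String) : Decidable (Spec_number_letters text out) := by unfold Spec_number_letters; infer_instance

-- ===== CLAIM (what is proved, stated in full; the proofs are below) =====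
def Claim_equal_number_letters : Prop := ∀ (text : String), Dom_number_letters text → Spec_number_letters text (number_letters text)

-- ===== LEMMAS AND PROOFS =====

-- common specification: label each char with (count so far) + 1, threading the counts as a function
def specGo : List Char → (Char → Nat) → List String
  | [], _ => []
  | c :: rest, cnt =>
    (c.toString ++ "_" ++ PySem.Int.toStr ((cnt c : Int) + 1)) ::
      specGo rest (fun x => if x = c then cnt c + 1 else cnt x)

lemma loopA_eq (l : List Char) (d : PySem.Dict Char Int) (out : List String) (cnt : Char → Nat)
    (hd : ∀ c, d.get? c = if cnt c = 0 then none else some ((cnt c : Int) + 1)) :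
    numberLettersLoop l d out = out ++ specGo l cnt := by
  induction l generalizing d out cnt with
  | nil => simp [numberLettersLoop, specGo]
  | cons c rest ih =>
    by_cases h0 : cnt c = 0
    · have hc : d.contains c = false := by
        rw [PySem.Dict.contains_eq_isSome_get?, hd c, if_pos h0]; rfl
      have hstep : numberLettersLoop (c :: rest) d out
          = numberLettersLoop rest (d.insert c 2)
              (out ++ [c.toString ++ "_" ++ PySem.Int.toStr 1]) := by
        simp [numberLettersLoop, hc, PySem.Dict.getD_insert_self,
          PySem.Dict.insert_insert_self]
      rw [hstep, ih _ _ (fun x => if x = c then cnt c + 1 else cnt x)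
        (by
          intro x
          rw [PySem.Dict.get?_insert]
          by_cases hx : x = c
          · simp [hx, h0]
          · simp [hx, hd x])]
      simp [specGo, h0]
    · have hc : d.contains c = true := by
        rw [PySem.Dict.contains_eq_isSome_get?, hd c, if_neg h0]; rfl
      have hg : d.getD c 0 = (cnt c : Int) + 1 := by
        rw [PySem.Dict.getD_eq_get?_getD, hd c, if_neg h0]; rfl
      have hstep : numberLettersLoop (c :: rest) d out
          = numberLettersLoop rest (d.insert c ((cnt c : Int) + 1 + 1))
              (out ++ [c.toString ++ "_" ++ PySem.Int.toStr ((cnt c : Int) + 1)]) := by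
        simp [numberLettersLoop, hc, hg]
      rw [hstep, ih _ _ (fun x => if x = c then cnt c + 1 else cnt x)
        (by
          intro x
          rw [PySem.Dict.get?_insert]
          by_cases hx : x = c
          · simp [hx]
          · simp [hx, hd x])]
      simp [specGo]

-- backward-pass specification: label each char with 1 + its count in the REST of the list
def specBack : List Char → List String
  | [] => []
  | c :: rest =>
    (c.toString ++ "_" ++ PySem.Int.toStr ((rest.count c : Int) + 1)) :: specBack rest

lemma loopB_eq (l : List Char) (d : PySem.Dict Char Int) (out : List String)
    (hd : ∀ c, d.getD c 0 = (l.count c : Int)) :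
    numberLettersBack l d out = out ++ specBack l := by
  induction l generalizing d out with
  | nil => simp [numberLettersBack, specBack]
  | cons c rest ih =>
    rw [numberLettersBack, ih _ _ (by
      intro x
      rw [PySem.Dict.getD_insert]
      by_cases hx : x = c
      · subst hx
        rw [if_pos rfl, hd x, List.count_cons_self]
        push_cast
        ring
      · simp [hx, Ne.symm hx, hd x])]
    rw [hd c, List.count_cons_self]
    simp [specBack]

lemma specGo_append (ys zs : List Char) (cnt : Char → Nat) :
    specGo (ys ++ zs) cnt = specGo ys cnt ++ specGo zs (fun x => cnt x + ys.count x) := by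
  induction ys generalizing cnt with
  | nil => simp [specGo]
  | cons a ys ih =>
    simp only [List.cons_append, specGo, List.cons_append, ih]
    have : (fun x => (if x = a then cnt a + 1 else cnt x) + ys.count x)
        = (fun x => cnt x + (a :: ys).count x) := by
      funext x
      by_cases hx : x = a
      · subst hx; rw [if_pos rfl, List.count_cons_self]; ring
      · simp [hx, Ne.symm hx, List.count_cons]
    rw [this]

lemma specBack_reverse (chars : List Char) :
    (specBack chars.reverse).reverse = specGo chars (fun _ => 0) := by
  induction chars using List.reverseRecOn with
  | nil => simp [specBack, specGo]
  | append_singleton ys c ih =>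
    rw [List.reverse_append, List.reverse_singleton, List.singleton_append, specBack,
      List.reverse_cons, ih, List.count_reverse, specGo_append]
    simp [specGo]

-- ===== VERDICT (by name: the statement is the Claim_ definition above) =====
theorem number_letters_spec : Claim_equal_number_letters := by
  intro text _
  unfold Spec_number_letters number_letters number_letters_alt
  rw [loopA_eq text.toList PySem.Dict.empty [] (fun _ => 0)
    (by intro c; simp [PySem.Dict.get?_empty])]
  rw [loopB_eq text.toList.reverse (numberLettersTotals text.toList) [] (by
    intro c
    unfold numberLettersTotals
    rw [PySem.Dict.getD_foldl_insert_add_one, PySem.Dict.getD_empty, List.count_reverse]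
    ring)]
  rw [List.nil_append, List.nil_append, specBack_reverse]
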